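-- pv_equiv track=rewrite | github.com/motokikando/code_algorithm | ABC/Medium/c_operation.py | reversible_count
-- ===== SOURCE A (Python) =====
-- def reversible_count(s: str) -> int:
--     cnt = 0
--     white_cnt = 0
--     for i in range(len(s)):
--         if s[i] == "W":
--             cnt += i - white_cnt
--             white_cnt += 1
--     return cnt
-- ===== SOURCE B (Python) =====
-- def reversible_count(s: str) -> int:
--     ws = [i for i, ch in enumerate(s) if ch == "W"]
--     m = len(ws)
--     return sum(ws) - m * (m - 1) // 2
-- ===== Notes on version B (the rewrite author's own statement) =====
-- stated objective: alternative
-- what changed: Replaced the running white_cnt accumulator (subtracting it at each white stone) by gathering all W indices and applying one closed-form triangular-number correction S - m*(m-1)//2 at the end.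
import Mathlib
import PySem

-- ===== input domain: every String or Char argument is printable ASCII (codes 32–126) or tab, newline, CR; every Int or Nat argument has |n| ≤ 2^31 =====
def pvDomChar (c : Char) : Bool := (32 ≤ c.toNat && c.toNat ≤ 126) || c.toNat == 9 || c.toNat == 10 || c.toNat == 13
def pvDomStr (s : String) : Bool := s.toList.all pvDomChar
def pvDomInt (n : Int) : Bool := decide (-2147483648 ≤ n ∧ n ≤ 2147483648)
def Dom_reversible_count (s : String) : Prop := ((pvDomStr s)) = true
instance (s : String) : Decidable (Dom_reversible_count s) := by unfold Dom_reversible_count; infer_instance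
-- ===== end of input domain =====

-- B replaces A's running white_cnt subtraction by summing all W indices and one
-- closed-form triangular correction S - m*(m-1)//2 (alternative decomposition, same cost).

-- ===== PORT A =====
def reversible_count (s : String) : Int :=
  ((PySem.List.enumerate s.toList 0).foldl
    (fun st p => if p.2 == 'W' then (st.1 + p.1 - st.2, st.2 + 1) else st)
    ((0 : Int), (0 : Int))).1

-- ===== PORT B =====
def reversible_count_alt (s : String) : Int :=
  let ws := ((PySem.List.enumerate s.toList 0).filter (fun p => p.2 == 'W')).map (fun p => p.1)
  let m : Int := ws.length
  ws.sum - PySem.Int.floordiv (m * (m - 1)) 2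

-- ===== PRECONDITION & SPEC =====
def Spec_reversible_count (s : String) (out : Int) : Prop := out = reversible_count_alt s
instance (s : String) (out : Int) : Decidable (Spec_reversible_count s out) := by unfold Spec_reversible_count; infer_instance

-- ===== CLAIM (what is proved, stated in full; the proofs are below) =====
def Claim_equal_reversible_count : Prop := ∀ (s : String), Dom_reversible_count s → Spec_reversible_count s (reversible_count s)

-- ===== LEMMAS AND PROOFS =====

def pvTri : Nat → Int
  | 0 => 0
  | n + 1 => pvTri n + n

def pvS (ps : List (Int × Char)) : Int := ((ps.filter (fun p => p.2 == 'W')).map (fun p => p.1)).sum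

def pvK (ps : List (Int × Char)) : Nat := ps.countP (fun p => p.2 == 'W')

lemma pv_fold_inv (ps : List (Int × Char)) (c w : Int) :
    (ps.foldl (fun st p => if p.2 == 'W' then (st.1 + p.1 - st.2, st.2 + 1) else st) (c, w))
      = (c + pvS ps - w * pvK ps - pvTri (pvK ps), w + pvK ps) := by
  induction ps generalizing c w with
  | nil => simp [pvS, pvK, pvTri]
  | cons p ps ih =>
    by_cases h : p.2 == 'W'
    · simp only [List.foldl_cons, h, if_pos, ih, pvS, pvK, List.filter_cons, List.countP_cons,
        List.map_cons, List.sum_cons, Prod.mk.injEq]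
      have hk : pvTri (ps.countP (fun p => p.2 == 'W') + 1)
          = pvTri (ps.countP (fun p => p.2 == 'W')) + (ps.countP (fun p => p.2 == 'W') : Int) := rfl
      constructor
      · rw [hk]; push_cast; ring
      · push_cast; ring
    · simp only [List.foldl_cons, h, if_neg, ih, pvS, pvK, List.filter_cons, List.countP_cons,
        List.map_cons, List.sum_cons, if_false, Bool.false_eq_true, not_false_iff]
      simp [h]

lemma pv_two_tri (k : Nat) : 2 * pvTri k = (k : Int) * ((k : Int) - 1) := by
  induction k with
  | zero => simp [pvTri]
  | succ n ih => show 2 * (pvTri n + n) = _; push_cast; push_cast at ih; nlinarith [ih]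

lemma pv_floordiv_tri (k : Nat) :
    PySem.Int.floordiv ((k : Int) * ((k : Int) - 1)) 2 = pvTri k := by
  rw [PySem.Int.floordiv_eq_ediv_of_pos (by norm_num : (0:Int) < 2)]
  have := pv_two_tri k
  omega

-- ===== VERDICT (by name: the statement is the Claim_ definition above) =====
theorem reversible_count_spec : Claim_equal_reversible_count := by
  intro s _
  unfold Spec_reversible_count reversible_count reversible_count_alt
  rw [pv_fold_inv]
  have hlen : ((((PySem.List.enumerate s.toList 0).filter (fun p => p.2 == 'W')).map
      (fun p => p.1)).length : Int) = (pvK (PySem.List.enumerate s.toList 0) : Int) := by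
    simp [pvK, ← List.countP_eq_length_filter]
  simp only [hlen, pv_floordiv_tri]
  show (0 : Int) + pvS _ - 0 * _ - pvTri _ = pvS _ - pvTri _
  ring
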